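-- pv_equiv track=rewrite | github.com/max3koz/Investigate_python_pytest_etc | Applications/list_update_function.py | remove_all_after
-- ===== SOURCE A (Python) =====
-- from collections.abc import Iterable
--
-- def remove_all_after(items: list[int], border: int) -> Iterable[int]:
--     """
--     Not all of the elements are important.
--     What you need to do here is to remove all of the elements after the given one from sequence.
--     """
--     if border in items:
--         res = []
--         for item in items:
--             if item != border:
--                 res.append(item)
--             elif item == border:
--                 res.append(item)
--                 break
--     else:
--         res = items
--     return res
-- ===== SOURCE B (Python) =====
-- def remove_all_after(items: list[int], border: int):
--     # Find the cut point once, then slice; the original list object when border is absent.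
--     try:
--         return items[:items.index(border) + 1]
--     except ValueError:
--         return items
-- ===== Notes on version B (the rewrite author's own statement) =====
-- stated objective: simpler
-- what changed: Replaces the membership test plus element-by-element append loop with a single index lookup and one contiguous slice (returning the original list when border is absent).
import Mathlib
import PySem

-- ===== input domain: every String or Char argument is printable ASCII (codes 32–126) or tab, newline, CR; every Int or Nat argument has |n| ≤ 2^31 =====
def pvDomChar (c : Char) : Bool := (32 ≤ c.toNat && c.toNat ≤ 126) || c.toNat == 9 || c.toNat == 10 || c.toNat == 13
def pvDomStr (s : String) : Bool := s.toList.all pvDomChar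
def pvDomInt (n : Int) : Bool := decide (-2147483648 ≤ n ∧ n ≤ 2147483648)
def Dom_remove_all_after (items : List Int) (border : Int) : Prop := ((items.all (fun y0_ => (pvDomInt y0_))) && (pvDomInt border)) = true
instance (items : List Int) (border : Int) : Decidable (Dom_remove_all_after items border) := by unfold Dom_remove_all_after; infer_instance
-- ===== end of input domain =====

-- B replaces A's membership test plus append-and-break loop by one index lookup and one slice (objective: simpler).

-- ===== PORT A =====
-- the 'for item in items: … break' loop with its growing res accumulator
def removeAllAfterLoopA (items : List Int) (border : Int) (res : List Int) : List Int :=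
  match items with
  | [] => res
  | item :: rest =>
    if item ≠ border then removeAllAfterLoopA rest border (res ++ [item])
    else res ++ [item]   -- the elif's condition item == border is true here

def remove_all_after (items : List Int) (border : Int) : List Int :=
  if border ∈ items then removeAllAfterLoopA items border []
  else items

-- ===== PORT B =====
def remove_all_after_alt (items : List Int) (border : Int) : List Int :=
  match PySem.List.index? items border with
  | some i => PySem.List.slice items none (some ((i : Int) + 1))
  | none => items

-- ===== PRECONDITION & SPEC =====
def Spec_remove_all_after (items : List Int) (border : Int) (out : List Int) : Prop := out = remove_all_after_alt items border
instance (items : List Int) (border : Int) (out : List Int) : Decidable (Spec_remove_all_after items border out) := by unfold Spec_remove_all_after; infer_instance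

-- ===== CLAIM (what is proved, stated in full; the proofs are below) =====
def Claim_equal_remove_all_after : Prop := ∀ (items : List Int) (border : Int), Dom_remove_all_after items border → Spec_remove_all_after items border (remove_all_after items border)

-- ===== LEMMAS AND PROOFS =====
theorem removeAllAfterLoopA_take (items : List Int) (border : Int) :
    ∀ (res : List Int) (i : Nat), PySem.List.index? items border = some i →
      removeAllAfterLoopA items border res = res ++ items.take (i + 1) := by
  induction items with
  | nil => intro res i h; simp [PySem.List.index?] at h
  | cons x xs ih =>
    intro res i h
    by_cases hx : x = border
    · subst hx
      rw [PySem.List.index?_cons_self] at h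
      cases h
      simp [removeAllAfterLoopA]
    · rw [PySem.List.index?_cons_of_ne xs hx] at h
      rcases Option.map_eq_some_iff.mp h with ⟨j, hj, rfl⟩
      rw [removeAllAfterLoopA, if_pos hx]
      rw [ih (res ++ [x]) j hj]
      simp [List.take_succ_cons]

theorem remove_all_after_spec : Claim_equal_remove_all_after := by
  intro items border _
  unfold Spec_remove_all_after remove_all_after remove_all_after_alt
  by_cases hm : border ∈ items
  · rw [if_pos hm]
    rcases Option.isSome_iff_exists.mp ((PySem.List.index?_isSome_iff items border).mpr hm) with ⟨i, hi⟩
    rw [removeAllAfterLoopA_take items border [] i hi, hi]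
    have h1 : ((i : Int) + 1) = ((i + 1 : Nat) : Int) := by push_cast; ring
    simp only [h1, PySem.List.slice_to_natCast, List.nil_append]
  · rw [if_neg hm]
    rw [(PySem.List.index?_eq_none_iff items border).mpr hm]
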